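-- pv_equiv track=rewrite | github.com/ckoutz/super_strength | app.py | find_saved_cardio_for_wid
-- ===== SOURCE A (Python) =====
-- from typing import Dict, Any, List, Optional
--
-- def find_saved_cardio_for_wid(saved_cardio: List[Dict[str, Any]], workout_id: str, origin: str) -> Optional[Dict[str, Any]]:
--     if not saved_cardio:
--         return None
--     for c in saved_cardio:
--         if c.get("workout_id") == workout_id and c.get("origin") == origin:
--             return c
--     for c in saved_cardio:
--         if c.get("workout_id") == workout_id:
--             return c
--     return None
-- ===== SOURCE B (Python) =====
-- from typing import Dict, Any, List, Optional
--
-- def find_saved_cardio_for_wid(saved_cardio: List[Dict[str, Any]], workout_id: str, origin: str) -> Optional[Dict[str, Any]]: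
--     fallback = None
--     for c in saved_cardio:
--         if c.get("workout_id") == workout_id:
--             if c.get("origin") == origin:
--                 return c
--             if fallback is None:
--                 fallback = c
--     return fallback
-- ===== Notes on version B (the rewrite author's own statement) =====
-- stated objective: simpler
-- what changed: Replaces A's two sequential passes (full match, then workout_id-only match) with a single pass that returns immediately on a full match and keeps the first workout_id-only match in a fallback variable.
import Mathlib
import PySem

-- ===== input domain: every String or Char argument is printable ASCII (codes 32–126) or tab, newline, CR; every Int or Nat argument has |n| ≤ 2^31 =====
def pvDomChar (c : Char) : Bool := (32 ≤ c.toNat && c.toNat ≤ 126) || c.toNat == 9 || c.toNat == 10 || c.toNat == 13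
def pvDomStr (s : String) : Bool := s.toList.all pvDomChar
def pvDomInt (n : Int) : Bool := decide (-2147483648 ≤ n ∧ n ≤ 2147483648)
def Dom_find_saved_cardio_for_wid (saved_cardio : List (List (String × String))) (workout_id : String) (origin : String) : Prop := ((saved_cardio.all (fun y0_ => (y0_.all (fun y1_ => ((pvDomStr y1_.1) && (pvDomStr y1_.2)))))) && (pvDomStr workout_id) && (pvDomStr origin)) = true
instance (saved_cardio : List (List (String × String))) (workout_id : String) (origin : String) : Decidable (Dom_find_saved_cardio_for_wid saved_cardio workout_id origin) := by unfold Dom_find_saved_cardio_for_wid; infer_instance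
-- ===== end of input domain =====

-- B replaces A's two sequential scans by a single pass that keeps the first workout_id-only match as a fallback (simpler).


-- ===== PORT A =====
-- first loop of A: first c with both workout_id and origin matching
def fswA_full (l : List (List (String × String))) (workout_id origin : String) : Option (List (String × String)) :=
  match l with
  | [] => none
  | c :: rest =>
    if PySem.Dict.get? (PySem.Dict.mk c) "workout_id" = some workout_id ∧ PySem.Dict.get? (PySem.Dict.mk c) "origin" = some origin then some c
    else fswA_full rest workout_id origin

-- second loop of A: first c with workout_id matching
def fswA_wid (l : List (List (String × String))) (workout_id : String) : Option (List (String × String)) :=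
  match l with
  | [] => none
  | c :: rest =>
    if PySem.Dict.get? (PySem.Dict.mk c) "workout_id" = some workout_id then some c
    else fswA_wid rest workout_id

def find_saved_cardio_for_wid (saved_cardio : List (List (String × String))) (workout_id : String) (origin : String) : Option (List (String × String)) :=
  if saved_cardio = [] then none
  else
    match fswA_full saved_cardio workout_id origin with
    | some c => some c
    | none => fswA_wid saved_cardio workout_id

-- ===== PORT B =====
-- B's single loop with a fallback variable
def fswB_loop (l : List (List (String × String))) (workout_id origin : String) (fb : Option (List (String × String))) : Option (List (String × String)) :=
  match l with
  | [] => fb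
  | c :: rest =>
    if PySem.Dict.get? (PySem.Dict.mk c) "workout_id" = some workout_id then
      if PySem.Dict.get? (PySem.Dict.mk c) "origin" = some origin then some c
      else if fb = none then fswB_loop rest workout_id origin (some c)
      else fswB_loop rest workout_id origin fb
    else fswB_loop rest workout_id origin fb

def find_saved_cardio_for_wid_alt (saved_cardio : List (List (String × String))) (workout_id : String) (origin : String) : Option (List (String × String)) :=
  fswB_loop saved_cardio workout_id origin none

-- ===== PRECONDITION & SPEC =====
def Spec_find_saved_cardio_for_wid (saved_cardio : List (List (String × String))) (workout_id : String) (origin : String) (out : Option (List (String × String))) : Prop := out = find_saved_cardio_for_wid_alt saved_cardio workout_id origin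
instance (saved_cardio : List (List (String × String))) (workout_id : String) (origin : String) (out : Option (List (String × String))) : Decidable (Spec_find_saved_cardio_for_wid saved_cardio workout_id origin out) := by unfold Spec_find_saved_cardio_for_wid; infer_instance

-- ===== CLAIM (what is proved, stated in full; the proofs are below) =====
def Claim_equal_find_saved_cardio_for_wid : Prop := ∀ (saved_cardio : List (List (String × String))) (workout_id : String) (origin : String), Dom_find_saved_cardio_for_wid saved_cardio workout_id origin → Spec_find_saved_cardio_for_wid saved_cardio workout_id origin (find_saved_cardio_for_wid saved_cardio workout_id origin)

-- ===== LEMMAS AND PROOFS =====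
-- B's loop = "full match wins; otherwise the fallback (if set) beats the workout_id-only scan"
theorem fswB_loop_char (l : List (List (String × String))) (workout_id origin : String) (fb : Option (List (String × String))) :
    fswB_loop l workout_id origin fb =
      match fswA_full l workout_id origin with
      | some c => some c
      | none => match fb with
                | some f => some f
                | none => fswA_wid l workout_id := by
  induction l generalizing fb with
  | nil => cases fb <;> simp [fswB_loop, fswA_full, fswA_wid]
  | cons c rest ih =>
    simp only [fswB_loop, fswA_full, fswA_wid]
    by_cases hw : PySem.Dict.get? (PySem.Dict.mk c) "workout_id" = some workout_id
    · by_cases ho : PySem.Dict.get? (PySem.Dict.mk c) "origin" = some origin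
      · simp [hw, ho]
      · cases fb <;> simp [hw, ho, ih]
    · cases fb <;> simp [hw, ih]

-- ===== VERDICT (by name: the statement is the Claim_ definition above) =====
theorem find_saved_cardio_for_wid_spec : Claim_equal_find_saved_cardio_for_wid := by
  intro saved_cardio workout_id origin _
  unfold Spec_find_saved_cardio_for_wid find_saved_cardio_for_wid find_saved_cardio_for_wid_alt
  rw [fswB_loop_char]
  cases saved_cardio with
  | nil => simp [fswA_full, fswA_wid]
  | cons c rest => simp
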